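-- pv_equiv track=rewrite | github.com/georgdcv/math-sheet-gen | generate_worksheets.py | _ones_as_dice_faces
-- ===== SOURCE A (Python) =====
-- from typing import Dict, List, Optional, Sequence, Tuple
--
-- def _dice_svg(face_value: int) -> str:
--     pip_positions = {
--         1: [(50, 50)],
--         2: [(25, 25), (75, 75)],
--         3: [(25, 25), (50, 50), (75, 75)],
--         4: [(25, 25), (75, 25), (25, 75), (75, 75)],
--         5: [(25, 25), (75, 25), (50, 50), (25, 75), (75, 75)],
--     }
--     circles = "".join(
--         f"<circle cx='{x}' cy='{y}' r='8' />" for x, y in pip_positions.get(face_value, [])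
--     )
--     return "<svg class='dice-svg' viewBox='0 0 100 100' role='img' aria-label='Würfel'>" f"{circles}</svg>"
--
-- def _ones_as_dice_faces(ones: int) -> List[str]:
--     faces: List[str] = []
--     while ones >= 5:
--         faces.append(_dice_svg(5))
--         ones -= 5
--     if ones:
--         faces.append(_dice_svg(ones))
--     return faces
-- ===== SOURCE B (Python) =====
-- from typing import Dict, List, Optional, Sequence, Tuple
--
-- _PIPS = (
--     [(50, 50)],
--     [(25, 25), (75, 75)],
--     [(25, 25), (50, 50), (75, 75)],
--     [(25, 25), (75, 25), (25, 75), (75, 75)],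
--     [(25, 25), (75, 25), (50, 50), (25, 75), (75, 75)],
-- )
--
-- def _dice_svg(face_value: int) -> str:
--     pts = _PIPS[face_value - 1] if 1 <= face_value <= 5 else []
--     circles = "".join("<circle cx='%d' cy='%d' r='8' />" % pt for pt in pts)
--     return "<svg class='dice-svg' viewBox='0 0 100 100' role='img' aria-label='Würfel'>" + circles + "</svg>"
--
-- def _ones_as_dice_faces(ones: int) -> List[str]:
--     if ones < 5:
--         return [_dice_svg(ones)] if ones else []
--     full, rem = divmod(ones, 5)
--     groups = [5] * full + ([rem] if rem else [])
--     return [_dice_svg(v) for v in groups]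
-- ===== Notes on version B (the rewrite author's own statement) =====
-- stated objective: alternative
-- what changed: Replaces the repeated-subtraction while-loop with closed-form divmod arithmetic: a list of face values ([5]*full plus an optional remainder) is built once and mapped through the SVG helper, which itself is rewritten to index a tuple table instead of a dict lookup.
import Mathlib
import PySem

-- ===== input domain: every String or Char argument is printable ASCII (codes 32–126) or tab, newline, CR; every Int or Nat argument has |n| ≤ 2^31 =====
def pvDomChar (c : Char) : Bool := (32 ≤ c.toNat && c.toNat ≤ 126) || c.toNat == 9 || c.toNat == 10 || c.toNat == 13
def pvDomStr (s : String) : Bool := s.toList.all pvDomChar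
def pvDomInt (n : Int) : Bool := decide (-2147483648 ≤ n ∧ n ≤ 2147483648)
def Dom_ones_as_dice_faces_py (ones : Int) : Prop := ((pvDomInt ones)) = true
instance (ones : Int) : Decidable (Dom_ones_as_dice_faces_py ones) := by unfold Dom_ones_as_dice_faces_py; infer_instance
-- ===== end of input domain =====

-- B replaces A's repeated-subtraction while-loop by closed-form divmod arithmetic over a face-value list (objective: alternative).

-- ===== PORT A =====
-- transliteration of Source A's _dice_svg (dict of pip positions, joined circle tags)
def diceSvg (face_value : Int) : String :=
  let pip_positions : PySem.Dict Int (List (Int × Int)) := PySem.Dict.ofList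
    [(1, [(50, 50)]),
     (2, [(25, 25), (75, 75)]),
     (3, [(25, 25), (50, 50), (75, 75)]),
     (4, [(25, 25), (75, 25), (25, 75), (75, 75)]),
     (5, [(25, 25), (75, 25), (50, 50), (25, 75), (75, 75)])]
  let circles := PySem.Str.join ""
    ((PySem.Dict.getD pip_positions face_value []).map
      (fun p => "<circle cx='" ++ PySem.Int.toStr p.1 ++ "' cy='" ++ PySem.Int.toStr p.2 ++ "' r='8' />"))
  "<svg class='dice-svg' viewBox='0 0 100 100' role='img' aria-label='Würfel'>" ++ circles ++ "</svg>"

-- the while-loop of A, as structural recursion on the same state (faces, ones)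
def onesLoopA (faces : List String) (ones : Int) : List String :=
  if h : ones ≥ 5 then onesLoopA (faces ++ [diceSvg 5]) (ones - 5)
  else if ones ≠ 0 then faces ++ [diceSvg ones] else faces
termination_by ones.toNat
decreasing_by omega

def ones_as_dice_faces_py (ones : Int) : List String := onesLoopA [] ones

-- ===== PORT B =====
-- Source B's module-level _PIPS tuple table
def pipsB : List (List (Int × Int)) :=
  [[(50, 50)],
   [(25, 25), (75, 75)],
   [(25, 25), (50, 50), (75, 75)],
   [(25, 25), (75, 25), (25, 75), (75, 75)],
   [(25, 25), (75, 25), (50, 50), (25, 75), (75, 75)]]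

-- Source B's _dice_svg: guarded tuple indexing (the guard makes the index in range, so getD [] is exact)
def diceSvgB (face_value : Int) : String :=
  let pts := if 1 ≤ face_value ∧ face_value ≤ 5
             then (PySem.List.pyGet? pipsB (face_value - 1)).getD [] else []
  let circles := PySem.Str.join ""
    (pts.map (fun pt => "<circle cx='" ++ PySem.Int.toStr pt.1 ++ "' cy='" ++ PySem.Int.toStr pt.2 ++ "' r='8' />"))
  "<svg class='dice-svg' viewBox='0 0 100 100' role='img' aria-label='Würfel'>" ++ circles ++ "</svg>"

def ones_as_dice_faces_py_alt (ones : Int) : List String :=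
  if ones < 5 then (if ones ≠ 0 then [diceSvgB ones] else [])
  else
    let full := PySem.Int.floordiv ones 5
    let rem := PySem.Int.mod ones 5
    let groups := List.replicate full.toNat (5 : Int) ++ (if rem ≠ 0 then [rem] else [])
    groups.map diceSvgB

-- ===== PRECONDITION & SPEC =====
def Spec_ones_as_dice_faces_py (ones : Int) (out : List String) : Prop := out = ones_as_dice_faces_py_alt ones
instance (ones : Int) (out : List String) : Decidable (Spec_ones_as_dice_faces_py ones out) := by unfold Spec_ones_as_dice_faces_py; infer_instance

-- ===== CLAIM (what is proved, stated in full; the proofs are below) =====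
def Claim_equal_ones_as_dice_faces_py : Prop := ∀ (ones : Int), Dom_ones_as_dice_faces_py ones → Spec_ones_as_dice_faces_py ones (ones_as_dice_faces_py ones)

-- ===== LEMMAS AND PROOFS =====

-- the two SVG helpers agree on every face value
set_option maxRecDepth 20000 in
theorem svgB_eq (n : Int) : diceSvgB n = diceSvg n := by
  by_cases h : 1 ≤ n ∧ n ≤ 5
  · obtain ⟨h1, h2⟩ := h
    interval_cases n <;> decide
  · have h1 : n ≠ 1 := by omega
    have h2 : n ≠ 2 := by omega
    have h3 : n ≠ 3 := by omega
    have h4 : n ≠ 4 := by omega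
    have h5 : n ≠ 5 := by omega
    have hd : (PySem.Dict.ofList
        [(1, [(50, 50)]),
         (2, [(25, 25), (75, 75)]),
         (3, [(25, 25), (50, 50), (75, 75)]),
         (4, [(25, 25), (75, 25), (25, 75), (75, 75)]),
         (5, [(25, 25), (75, 25), (50, 50), (25, 75), (75, 75)])] : PySem.Dict Int (List (Int × Int))) =
        PySem.Dict.mk
        [(1, [(50, 50)]),
         (2, [(25, 25), (75, 75)]),
         (3, [(25, 25), (50, 50), (75, 75)]),
         (4, [(25, 25), (75, 25), (25, 75), (75, 75)]),
         (5, [(25, 25), (75, 25), (50, 50), (25, 75), (75, 75)])] := by decide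
    simp [diceSvgB, diceSvg, h, hd, PySem.Dict.getD, PySem.Dict.get?,
          Ne.symm h1, Ne.symm h2, Ne.symm h3, Ne.symm h4, Ne.symm h5]

-- B peels one five-face per 5 subtracted: the step A's loop performs
theorem alt_step (ones : Int) (h : ones ≥ 5) :
    ones_as_dice_faces_py_alt ones = diceSvgB 5 :: ones_as_dice_faces_py_alt (ones - 5) := by
  have h5 : (0:Int) < 5 := by norm_num
  unfold ones_as_dice_faces_py_alt
  rw [PySem.Int.floordiv_eq_ediv_of_pos h5, PySem.Int.mod_eq_emod_of_pos h5]
  have hlt : ¬ ones < 5 := by omega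
  rw [if_neg hlt]
  by_cases h2 : ones - 5 < 5
  · -- 5 ≤ ones < 10 : quotient 1, remainder ones - 5
    have hq : ones / 5 = 1 := by omega
    have hr : ones % 5 = ones - 5 := by omega
    simp only [hq, hr, if_pos h2]
    by_cases hz : ones - 5 = 0 <;> simp [hz]
  · rw [if_neg h2, PySem.Int.floordiv_eq_ediv_of_pos h5, PySem.Int.mod_eq_emod_of_pos h5]
    have hq : (ones - 5) / 5 = ones / 5 - 1 := by omega
    have hr : (ones - 5) % 5 = ones % 5 := by omega
    have hqt : (ones / 5).toNat = ((ones - 5) / 5).toNat + 1 := by omega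
    simp only [hq, hr, hqt, List.replicate_succ]
    split <;> simp

-- A's loop accumulates exactly B's list
theorem loop_eq (faces : List String) (ones : Int) :
    onesLoopA faces ones = faces ++ ones_as_dice_faces_py_alt ones := by
  fun_induction onesLoopA faces ones with
  | case1 faces ones h ih =>
      rw [ih, alt_step ones h, svgB_eq]
      simp
  | case2 faces ones h hz =>
      have hlt : ones < 5 := by omega
      simp [ones_as_dice_faces_py_alt, if_pos hlt, hz, svgB_eq]
  | case3 faces ones h hz =>
      have hlt : ones < 5 := by omega
      simp_all [ones_as_dice_faces_py_alt]

-- ===== VERDICT (by name: the statement is the Claim_ definition above) =====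
theorem ones_as_dice_faces_py_spec : Claim_equal_ones_as_dice_faces_py := by
  intro ones _
  show ones_as_dice_faces_py ones = ones_as_dice_faces_py_alt ones
  rw [ones_as_dice_faces_py, loop_eq, List.nil_append]
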